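-- pv_equiv track=rewrite | github.com/ayoubzulfiqar/Leetcode-Medium | FindtheClosestMarkedNode/find_the_closest_marked_node.py | find_closest_marked_node
-- ===== SOURCE A (Python) =====
-- import collections
--
-- def find_closest_marked_node(graph, start_node, marked_nodes):
--     if not graph:
--         return -1
--     if start_node not in graph:
--         return -1
--
--     marked_nodes_set = set(marked_nodes)
--
--     if start_node in marked_nodes_set:
--         return 0
--
--     queue = collections.deque([(start_node, 0)])
--     visited = {start_node}
--
--     while queue:
--         current_node, distance = queue.popleft()
--
--         for neighbor in graph.get(current_node, []):
--             if neighbor not in visited: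
--                 visited.add(neighbor)
--                 if neighbor in marked_nodes_set:
--                     return distance + 1
--                 queue.append((neighbor, distance + 1))
--
--     return -1
-- ===== SOURCE B (Python) =====
-- def find_closest_marked_node(graph, start_node, marked_nodes):
--     if not graph:
--         return -1
--     if start_node not in graph:
--         return -1
--     marked = set(marked_nodes)
--     if start_node in marked:
--         return 0
--     seen = {start_node}
--     layer = {start_node}
--     dist = 0
--     while layer:
--         dist += 1
--         layer = {nb for node in layer for nb in graph.get(node, []) if nb not in seen}
--         if layer & marked:
--             return dist
--         seen |= layer
--     return -1
-- ===== Notes on version B (the rewrite author's own statement) =====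
-- stated objective: alternative
-- what changed: Replaces the FIFO queue of (node, distance) pairs and the per-neighbor early return with queue-free level-synchronous set expansion: each round builds the whole next layer as a set comprehension, tests it against the marked set by intersection, and advances seen by set union.
import Mathlib
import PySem

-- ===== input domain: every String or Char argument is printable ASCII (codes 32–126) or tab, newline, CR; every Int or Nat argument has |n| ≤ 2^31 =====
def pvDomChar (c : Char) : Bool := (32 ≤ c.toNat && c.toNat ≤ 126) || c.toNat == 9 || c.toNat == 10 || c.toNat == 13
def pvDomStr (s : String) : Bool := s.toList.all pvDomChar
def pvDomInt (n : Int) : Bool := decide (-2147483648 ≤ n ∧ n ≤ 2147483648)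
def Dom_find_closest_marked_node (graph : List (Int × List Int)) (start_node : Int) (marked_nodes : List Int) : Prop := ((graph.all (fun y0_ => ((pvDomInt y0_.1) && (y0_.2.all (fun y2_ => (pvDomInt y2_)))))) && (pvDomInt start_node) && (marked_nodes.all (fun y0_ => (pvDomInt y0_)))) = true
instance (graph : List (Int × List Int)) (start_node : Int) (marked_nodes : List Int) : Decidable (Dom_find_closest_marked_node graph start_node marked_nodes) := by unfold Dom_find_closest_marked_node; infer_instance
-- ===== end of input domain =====

-- B replaces A's FIFO queue of (node, distance) pairs and per-neighbor early return by queue-free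
-- level-synchronous set expansion (build whole next layer, intersect with the marked set); same results.

-- ===== PORT A =====

-- all neighbour values occurring in the graph, deduplicated (measure material for the loops)
def pvAllNbrs (graph : List (Int × List Int)) : List Int :=
  PySem.Set.ofList (graph.flatMap (fun p => p.2))

-- counting lemma used by both loops' termination proofs
theorem pvCount (S t : List Int) (p q : Int → Bool) (hS : S.Nodup) (ht : t.Nodup)
    (htp : ∀ x ∈ t, x ∈ S ∧ p x = true) (hq : ∀ x, q x = true ↔ (p x = true ∧ x ∉ t)) :
    (S.filter q).length + t.length ≤ (S.filter p).length := by
  have h1 : (S.filter q).length ≤ (S.filter (fun x => p x && !(decide (x ∈ t)))).length := by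
    rw [← List.countP_eq_length_filter, ← List.countP_eq_length_filter]
    refine List.countP_mono_left (fun x _ hx => ?_)
    rcases (hq x).mp hx with ⟨hp, hnt⟩
    simp [hp, hnt]
  have h2 : t.length ≤ (S.filter (fun x => p x && decide (x ∈ t))).length := by
    refine List.Subperm.length_le (ht.subperm (fun x hx => ?_))
    rcases htp x hx with ⟨hS', hp⟩
    simp [List.mem_filter, hS', hp, hx]
  have h3 : (S.filter (fun x => p x && !(decide (x ∈ t)))).length +
      (S.filter (fun x => p x && decide (x ∈ t))).length = (S.filter p).length := by
    clear h1 h2 htp hq hS ht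
    induction S with
    | nil => simp
    | cons a S ih =>
      by_cases hm : a ∈ t <;> cases hpa : p a <;>
        simp [List.filter_cons, hpa, hm] <;> omega
  omega

theorem pvGetD_subset (graph : List (Int × List Int)) (n x : Int)
    (hx : x ∈ (PySem.Dict.mk graph).getD n []) : x ∈ pvAllNbrs graph := by
  unfold pvAllNbrs
  rw [PySem.Set.mem_ofList]
  induction graph with
  | nil => simp [PySem.Dict.getD, PySem.Dict.get?] at hx
  | cons p rest ih =>
    obtain ⟨k, v⟩ := p
    rw [show (PySem.Dict.mk ((k, v) :: rest)).getD n [] =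
        ((PySem.Dict.mk ((k, v) :: rest)).get? n).getD [] from rfl,
      PySem.Dict.get?_mk_cons] at hx
    by_cases hk : (k == n) = true
    · simp only [hk, if_pos, Option.getD_some] at hx
      simp [List.mem_flatMap]
      exact Or.inl hx
    · simp only [hk, if_neg, Bool.false_eq_true, not_false_iff, ite_false] at hx
      have := ih hx
      simp only [List.flatMap_cons, List.mem_append]
      exact Or.inr this

-- the inner `for neighbor in graph.get(current_node, [])` loop of A
def pvInnerA (m : PySem.Set Int) (d : Int) :
    List Int → PySem.Set Int → List (Int × Int) → Sum Int (PySem.Set Int × List (Int × Int))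
  | [], vis, app => .inr (vis, app)
  | nb :: t, vis, app =>
    if PySem.Set.contains vis nb then
      pvInnerA m d t vis app
    else
      let vis' := PySem.Set.add vis nb
      if PySem.Set.contains m nb then .inl (d + 1)
      else pvInnerA m d t vis' (app ++ [(nb, d + 1)])

-- shape of a completed inner scan (cited by pvLoopA's decreasing_by)
theorem pvInnerA_inr (m : PySem.Set Int) (d : Int) (nbrs : List Int) (vis : PySem.Set Int)
    (app : List (Int × Int)) (vis' : PySem.Set Int) (app' : List (Int × Int))
    (h : pvInnerA m d nbrs vis app = .inr (vis', app')) :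
    ∃ ns : List Int, vis' = vis ++ ns ∧ app' = app ++ ns.map (fun x => (x, d + 1)) ∧
      ns.Nodup ∧ ∀ x ∈ ns, x ∉ vis ∧ x ∈ nbrs := by
  induction nbrs generalizing vis app with
  | nil =>
    simp only [pvInnerA, Sum.inr.injEq, Prod.mk.injEq] at h
    exact ⟨[], by simp [h.1.symm, h.2.symm]⟩
  | cons nb t ih =>
    by_cases hc : PySem.Set.contains vis nb = true
    · simp only [pvInnerA, hc, if_true] at h
      obtain ⟨ns, h1, h2, h3, h4⟩ := ih _ _ h
      exact ⟨ns, h1, h2, h3, fun x hx => ⟨(h4 x hx).1, List.mem_cons_of_mem _ (h4 x hx).2⟩⟩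
    · have hnb : nb ∉ vis := fun hm => hc ((PySem.Set.contains_iff vis nb).mpr hm)
      have hadd : PySem.Set.add vis nb = vis ++ [nb] := by
        simp [PySem.Set.add, hnb]
      by_cases hm : PySem.Set.contains m nb = true
      · simp [pvInnerA, hnb, (PySem.Set.contains_iff m nb).mp hm] at h
      · have hm' : nb ∉ m := fun hx => hm ((PySem.Set.contains_iff m nb).mpr hx)
        simp only [pvInnerA] at h
        simp [hnb, hm', hadd] at h
        obtain ⟨ns, h1, h2, h3, h4⟩ := ih _ _ h
        refine ⟨nb :: ns, ?_, ?_, ?_, ?_⟩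
        · rw [h1, List.append_assoc]; rfl
        · rw [h2, List.append_assoc]; rfl
        · exact List.nodup_cons.mpr ⟨fun hx => (h4 nb hx).1 (by simp), h3⟩
        · intro x hx
          rcases List.mem_cons.mp hx with rfl | hx
          · exact ⟨hnb, by simp⟩
          · refine ⟨fun hv => (h4 x hx).1 (by simp [hv]), List.mem_cons_of_mem _ (h4 x hx).2⟩

theorem pvLoopA_measure (graph : List (Int × List Int)) (vis : PySem.Set Int) (ns : List Int)
    (n : Int) (hnd : ns.Nodup) (hns : ∀ x ∈ ns, x ∉ vis ∧ x ∈ (PySem.Dict.mk graph).getD n []) :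
    ((pvAllNbrs graph).filter (fun x => decide (¬ x ∈ vis ++ ns))).length + ns.length ≤
      ((pvAllNbrs graph).filter (fun x => decide (¬ x ∈ vis))).length := by
  refine pvCount _ ns _ _ (PySem.Set.nodup_ofList _) hnd
    (fun x hx => ⟨pvGetD_subset graph n x (hns x hx).2, by simp [(hns x hx).1]⟩)
    (fun x => ?_)
  simp [List.mem_append]

-- A's `while queue` loop
def pvLoopA (graph : List (Int × List Int)) (m : PySem.Set Int) :
    List (Int × Int) → PySem.Set Int → Int
  | [], _ => -1
  | (n, d) :: rest, vis =>
    match h : pvInnerA m d ((PySem.Dict.mk graph).getD n []) vis [] with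
    | .inl r => r
    | .inr (vis', app) => pvLoopA graph m (rest ++ app) vis'
termination_by queue vis => ((pvAllNbrs graph).filter (fun x => decide (¬ x ∈ vis))).length + queue.length
decreasing_by
  obtain ⟨ns, hv, ha, hnd, hns⟩ := pvInnerA_inr _ _ _ _ _ _ _ h
  subst hv ha
  have := pvLoopA_measure graph vis ns n hnd hns
  simp only [List.length_append, List.length_map, List.length_cons, List.nil_append] at *
  omega

def find_closest_marked_node (graph : List (Int × List Int)) (start_node : Int) (marked_nodes : List Int) : Int :=
  if graph = [] then -1
  else if ¬ (PySem.Dict.mk graph).contains start_node then -1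
  else
    let ms := PySem.Set.ofList marked_nodes
    if PySem.Set.contains ms start_node then 0
    else pvLoopA graph ms [(start_node, 0)] (PySem.Set.ofList [start_node])

-- ===== PORT B =====

-- inner generator clause `for nb in graph.get(node, []) if nb not in seen` of the set comprehension
def pvScanB (seen : PySem.Set Int) (nbrs : List Int) (acc : PySem.Set Int) : PySem.Set Int :=
  nbrs.foldl (fun a nb => if PySem.Set.contains seen nb then a else PySem.Set.add a nb) acc

-- the whole comprehension `{nb for node in layer for nb in graph.get(node, []) if nb not in seen}`
def pvBuildB (graph : List (Int × List Int)) (seen : PySem.Set Int) :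
    List Int → PySem.Set Int → PySem.Set Int
  | [], acc => acc
  | node :: t, acc => pvBuildB graph seen t (pvScanB seen ((PySem.Dict.mk graph).getD node []) acc)

theorem pvScanB_spec (seen : PySem.Set Int) (nbrs : List Int) (acc : PySem.Set Int) :
    ∃ ns : List Int, pvScanB seen nbrs acc = acc ++ ns ∧ ns.Nodup ∧
      ∀ x ∈ ns, x ∉ seen ∧ x ∉ acc ∧ x ∈ nbrs := by
  induction nbrs generalizing acc with
  | nil => exact ⟨[], by simp [pvScanB]⟩
  | cons nb t ih =>
    have hstep : pvScanB seen (nb :: t) acc =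
        pvScanB seen t (if PySem.Set.contains seen nb then acc else PySem.Set.add acc nb) := rfl
    by_cases hs : PySem.Set.contains seen nb = true
    · rw [hstep, if_pos hs]
      obtain ⟨ns, h1, h2, h3⟩ := ih acc
      exact ⟨ns, h1, h2, fun x hx => ⟨(h3 x hx).1, (h3 x hx).2.1, List.mem_cons_of_mem _ (h3 x hx).2.2⟩⟩
    · have hsm : nb ∉ seen := fun hx => hs ((PySem.Set.contains_iff seen nb).mpr hx)
      by_cases ha : nb ∈ acc
      · have : PySem.Set.add acc nb = acc := by simp [PySem.Set.add, ha]
        rw [hstep, if_neg hs, this]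
        obtain ⟨ns, h1, h2, h3⟩ := ih acc
        exact ⟨ns, h1, h2, fun x hx => ⟨(h3 x hx).1, (h3 x hx).2.1, List.mem_cons_of_mem _ (h3 x hx).2.2⟩⟩
      · have hadd : PySem.Set.add acc nb = acc ++ [nb] := by simp [PySem.Set.add, ha]
        rw [hstep, if_neg hs, hadd]
        obtain ⟨ns, h1, h2, h3⟩ := ih (acc ++ [nb])
        refine ⟨nb :: ns, by rw [h1, List.append_assoc]; rfl, ?_, ?_⟩
        · exact List.nodup_cons.mpr ⟨fun hx => (h3 nb hx).2.1 (by simp), h2⟩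
        · intro x hx
          rcases List.mem_cons.mp hx with rfl | hx
          · exact ⟨hsm, ha, by simp⟩
          · exact ⟨(h3 x hx).1, fun hv => (h3 x hx).2.1 (by simp [hv]),
              List.mem_cons_of_mem _ (h3 x hx).2.2⟩

-- shape of a built layer (cited by pvLoopB's decreasing_by)
theorem pvBuildB_spec (graph : List (Int × List Int)) (seen : PySem.Set Int) (l : List Int)
    (acc : PySem.Set Int) :
    ∃ ns : List Int, pvBuildB graph seen l acc = acc ++ ns ∧ ns.Nodup ∧
      ∀ x ∈ ns, x ∉ seen ∧ x ∉ acc ∧ ∃ n ∈ l, x ∈ (PySem.Dict.mk graph).getD n [] := by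
  induction l generalizing acc with
  | nil => exact ⟨[], by simp [pvBuildB]⟩
  | cons node t ih =>
    obtain ⟨ns1, e1, nd1, h1⟩ := pvScanB_spec seen ((PySem.Dict.mk graph).getD node []) acc
    obtain ⟨ns2, e2, nd2, h2⟩ := ih (pvScanB seen ((PySem.Dict.mk graph).getD node []) acc)
    refine ⟨ns1 ++ ns2, ?_, ?_, ?_⟩
    · show pvBuildB graph seen t _ = _
      rw [e2, e1, List.append_assoc]
    · refine List.Nodup.append nd1 nd2 (fun x hx1 hx2 => ?_)
      exact (h2 x hx2).2.1 (by simp [e1, hx1])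
    · intro x hx
      rcases List.mem_append.mp hx with hx | hx
      · exact ⟨(h1 x hx).1, (h1 x hx).2.1, node, List.mem_cons_self, (h1 x hx).2.2⟩
      · refine ⟨(h2 x hx).1, fun hv => (h2 x hx).2.1 (by simp [e1, hv]), ?_⟩
        obtain ⟨n, hn, hxn⟩ := (h2 x hx).2.2
        exact ⟨n, List.mem_cons_of_mem _ hn, hxn⟩

theorem pvLoopB_measure (graph : List (Int × List Int)) (seen layer : PySem.Set Int)
    (hl : layer ≠ []) :
    ((pvAllNbrs graph).filter (fun x =>
        decide (¬ x ∈ PySem.Set.union seen (pvBuildB graph seen layer PySem.Set.empty)))).length +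
      (pvBuildB graph seen layer PySem.Set.empty).length <
    ((pvAllNbrs graph).filter (fun x => decide (¬ x ∈ seen))).length + layer.length := by
  obtain ⟨ns, e, nd, hp⟩ := pvBuildB_spec graph seen layer PySem.Set.empty
  have hnil : pvBuildB graph seen layer PySem.Set.empty = ns := by
    simpa [PySem.Set.empty] using e
  have hcount : ((pvAllNbrs graph).filter (fun x =>
        decide (¬ x ∈ PySem.Set.union seen ns))).length + ns.length ≤
      ((pvAllNbrs graph).filter (fun x => decide (¬ x ∈ seen))).length := by
    refine pvCount _ ns _ _ (PySem.Set.nodup_ofList _) nd (fun x hx => ?_) (fun x => ?_)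
    · obtain ⟨n, _, hxn⟩ := (hp x hx).2.2
      exact ⟨pvGetD_subset graph n x hxn, by simp [(hp x hx).1]⟩
    · have hu : x ∈ PySem.Set.union seen ns ↔ x ∈ seen ∨ x ∈ ns := PySem.Set.mem_union seen ns x
      simp only [decide_eq_true_eq, hu]
      tauto
  rw [hnil]
  have : 1 ≤ layer.length := List.length_pos_iff.mpr hl
  omega

-- B's `while layer` loop
def pvLoopB (graph : List (Int × List Int)) (m : PySem.Set Int) :
    PySem.Set Int → PySem.Set Int → Int → Int
  | layer, seen, dist =>
    if h : layer = [] then -1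
    else
      let d' := dist + 1
      let nl := pvBuildB graph seen layer PySem.Set.empty
      if PySem.Set.inter nl m = [] then pvLoopB graph m nl (PySem.Set.union seen nl) d'
      else d'
termination_by layer seen dist => ((pvAllNbrs graph).filter (fun x => decide (¬ x ∈ seen))).length + layer.length
decreasing_by
  exact pvLoopB_measure graph seen layer h

def find_closest_marked_node_alt (graph : List (Int × List Int)) (start_node : Int) (marked_nodes : List Int) : Int :=
  if graph = [] then -1
  else if ¬ (PySem.Dict.mk graph).contains start_node then -1
  else
    let ms := PySem.Set.ofList marked_nodes
    if PySem.Set.contains ms start_node then 0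
    else
      let s0 := PySem.Set.ofList [start_node]
      pvLoopB graph ms s0 s0 0

-- ===== PRECONDITION & SPEC =====
def Spec_find_closest_marked_node (graph : List (Int × List Int)) (start_node : Int) (marked_nodes : List Int) (out : Int) : Prop := out = find_closest_marked_node_alt graph start_node marked_nodes
instance (graph : List (Int × List Int)) (start_node : Int) (marked_nodes : List Int) (out : Int) : Decidable (Spec_find_closest_marked_node graph start_node marked_nodes out) := by unfold Spec_find_closest_marked_node; infer_instance

-- ===== CLAIM (what is proved, stated in full; the proofs are below) =====
def Claim_equal_find_closest_marked_node : Prop := ∀ (graph : List (Int × List Int)) (start_node : Int) (marked_nodes : List Int), Dom_find_closest_marked_node graph start_node marked_nodes → Spec_find_closest_marked_node graph start_node marked_nodes (find_closest_marked_node graph start_node marked_nodes)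

-- ===== LEMMAS AND PROOFS =====

-- one inner scan: A's early-returning pass and B's guarded set build agree
theorem pvL1 (m : PySem.Set Int) (d : Int) (nbrs : List Int) (seen acc : PySem.Set Int)
    (app : List (Int × Int)) :
    (pvInnerA m d nbrs (seen ++ acc) app = Sum.inl (d + 1) ∧
      ∃ x ∈ pvScanB seen nbrs acc, PySem.Set.contains m x = true) ∨
    (∃ ns : List Int, pvScanB seen nbrs acc = acc ++ ns ∧
      pvInnerA m d nbrs (seen ++ acc) app =
        Sum.inr (seen ++ (acc ++ ns), app ++ ns.map (fun x => (x, d + 1))) ∧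
      ∀ x ∈ ns, PySem.Set.contains m x = false) := by
  induction nbrs generalizing acc app with
  | nil => exact Or.inr ⟨[], by simp [pvScanB, pvInnerA]⟩
  | cons nb t ih =>
    have hstep : pvScanB seen (nb :: t) acc =
        pvScanB seen t (if PySem.Set.contains seen nb then acc else PySem.Set.add acc nb) := rfl
    by_cases hs : nb ∈ seen
    · have hA : pvInnerA m d (nb :: t) (seen ++ acc) app = pvInnerA m d t (seen ++ acc) app := by
        simp [pvInnerA, List.mem_append, hs]
      have hcs : PySem.Set.contains seen nb = true := (PySem.Set.contains_iff seen nb).mpr hs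
      rw [hstep, if_pos hcs]
      rw [hA]
      exact ih acc app
    · have hcs : PySem.Set.contains seen nb = false :=
        Bool.eq_false_iff.mpr (fun h => hs ((PySem.Set.contains_iff seen nb).mp h))
      by_cases ha : nb ∈ acc
      · have hA : pvInnerA m d (nb :: t) (seen ++ acc) app = pvInnerA m d t (seen ++ acc) app := by
          simp [pvInnerA, List.mem_append, ha]
        have haddB : PySem.Set.add acc nb = acc := by simp [PySem.Set.add, ha]
        rw [hstep, if_neg (by simp [hs]), haddB, hA]
        exact ih acc app
      · have hnv : nb ∉ seen ++ acc := by simp [List.mem_append, hs, ha]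
        have haddB : PySem.Set.add acc nb = acc ++ [nb] := by simp [PySem.Set.add, ha]
        rw [hstep, if_neg (by simp [hs]), haddB]
        by_cases hm : nb ∈ m
        · have hA : pvInnerA m d (nb :: t) (seen ++ acc) app = Sum.inl (d + 1) := by
            simp [pvInnerA, hnv, hm]
          obtain ⟨ns, e, _, _⟩ := pvScanB_spec seen t (acc ++ [nb])
          refine Or.inl ⟨hA, nb, ?_, (PySem.Set.contains_iff m nb).mpr hm⟩
          rw [e]; simp
        · have hA : pvInnerA m d (nb :: t) (seen ++ acc) app =
              pvInnerA m d t (seen ++ (acc ++ [nb])) (app ++ [(nb, d + 1)]) := by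
            simp [pvInnerA, hnv, hm, PySem.Set.add, List.append_assoc]
          rw [hA]
          rcases ih (acc ++ [nb]) (app ++ [(nb, d + 1)]) with ⟨hret, x, hx, hxm⟩ | ⟨ns, e, hret, hnm⟩
          · exact Or.inl ⟨hret, x, hx, hxm⟩
          · refine Or.inr ⟨nb :: ns, ?_, ?_, ?_⟩
            · rw [e, List.append_assoc]; rfl
            · rw [hret]; congr 1 <;> simp [List.append_assoc]
            · intro x hx
              rcases List.mem_cons.mp hx with rfl | hx
              · exact Bool.eq_false_iff.mpr (fun h => hm ((PySem.Set.contains_iff m x).mp h))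
              · exact hnm x hx

-- one whole level of A's queue against B's layer build
theorem pvLevel (graph : List (Int × List Int)) (m seen : PySem.Set Int) (d : Int)
    (l1 : List Int) (acc : PySem.Set Int) (hacc : ∀ x ∈ acc, PySem.Set.contains m x = false) :
    pvLoopA graph m (l1.map (fun x => (x, d)) ++ acc.map (fun x => (x, d + 1))) (seen ++ acc) =
      (if PySem.Set.inter (pvBuildB graph seen l1 acc) m = []
       then pvLoopA graph m ((pvBuildB graph seen l1 acc).map (fun x => (x, d + 1)))
              (seen ++ pvBuildB graph seen l1 acc)
       else d + 1) := by
  induction l1 generalizing acc hacc with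
  | nil =>
    have hb : pvBuildB graph seen [] acc = acc := rfl
    rw [hb]
    have hi : PySem.Set.inter acc m = [] := by
      show acc.filter (fun x => PySem.Set.contains m x) = []
      exact List.filter_eq_nil_iff.mpr (fun x hx => by rw [hacc x hx]; simp)
    rw [if_pos hi]
    simp
  | cons n t ih =>
    rcases pvL1 m d ((PySem.Dict.mk graph).getD n []) seen acc []
      with ⟨hret, x, hx, hxm⟩ | ⟨ns, e, hret, hnm⟩
    · obtain ⟨ns2, e2, _, _⟩ := pvBuildB_spec graph seen t
        (pvScanB seen ((PySem.Dict.mk graph).getD n []) acc)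
      have hxb : x ∈ pvBuildB graph seen (n :: t) acc := by
        show x ∈ pvBuildB graph seen t _
        rw [e2]
        exact List.mem_append.mpr (Or.inl hx)
      have hxi : x ∈ PySem.Set.inter (pvBuildB graph seen (n :: t) acc) m := by
        show x ∈ List.filter _ _
        exact List.mem_filter.mpr ⟨hxb, hxm⟩
      rw [if_neg (List.ne_nil_of_mem hxi)]
      simp only [List.map_cons, List.cons_append]
      rw [pvLoopA]
      split
      · next r heq => rw [hret] at heq; cases heq; rfl
      · next vis' app heq => rw [hret] at heq; cases heq
    · have hbuild : pvBuildB graph seen (n :: t) acc = pvBuildB graph seen t (acc ++ ns) := by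
        show pvBuildB graph seen t _ = _
        rw [e]
      rw [hbuild]
      simp only [List.map_cons, List.cons_append]
      rw [pvLoopA]
      split
      · next r heq => rw [hret] at heq; cases heq
      · next vis' app heq =>
        rw [hret] at heq
        simp only [Sum.inr.injEq, Prod.mk.injEq] at heq
        obtain ⟨h1, h2⟩ := heq
        subst h1 h2
        have hih := ih (acc ++ ns) (fun x hx => by
          rcases List.mem_append.mp hx with hx | hx
          · exact hacc x hx
          · exact hnm x hx)
        simpa [List.map_append, List.append_assoc] using hih

theorem pvUnionAppend (s t : List Int) (ht : t.Nodup) (hd : ∀ x ∈ t, x ∉ s) :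
    PySem.Set.union s t = s ++ t := by
  induction t generalizing s with
  | nil => simp [PySem.Set.union, PySem.Set.update]
  | cons a t ih =>
    have hadd : PySem.Set.add s a = s ++ [a] := by simp [PySem.Set.add, hd a List.mem_cons_self]
    have hstep : PySem.Set.union s (a :: t) = PySem.Set.union (PySem.Set.add s a) t := rfl
    have hrest : ∀ x ∈ t, x ∉ s ++ [a] := by
      intro x hx hmem
      rcases List.mem_append.mp hmem with hs | hone
      · exact hd x (List.mem_cons_of_mem _ hx) hs
      · rcases List.mem_singleton.mp hone with rfl
        exact (List.nodup_cons.mp ht).1 hx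
    rw [hstep, hadd, ih (s ++ [a]) (List.Nodup.of_cons ht) hrest, List.append_assoc]
    rfl

theorem pvMain (graph : List (Int × List Int)) (m : PySem.Set Int) (N : Nat) :
    ∀ (layer seen : PySem.Set Int) (d : Int),
      ((pvAllNbrs graph).filter (fun x => decide (¬ x ∈ seen))).length + layer.length ≤ N →
      pvLoopA graph m (layer.map (fun x => (x, d))) seen = pvLoopB graph m layer seen d := by
  induction N with
  | zero =>
    intro layer seen d hN
    have : layer = [] := List.length_eq_zero_iff.mp (by omega)
    subst this
    rw [pvLoopB]
    simp [pvLoopA]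
  | succ N ih =>
    intro layer seen d hN
    by_cases hl : layer = []
    · subst hl
      rw [pvLoopB]
      simp [pvLoopA]
    · rw [pvLoopB, dif_neg hl]
      obtain ⟨ns, e, nd, hp⟩ := pvBuildB_spec graph seen layer PySem.Set.empty
      have hnil : pvBuildB graph seen layer PySem.Set.empty = ns := by
        simpa [PySem.Set.empty] using e
      have hlevel := pvLevel graph m seen d layer [] (by simp)
      simp only [List.map_nil, List.append_nil] at hlevel
      have hempty : pvBuildB graph seen layer ([] : PySem.Set Int) =
          pvBuildB graph seen layer PySem.Set.empty := rfl
      rw [hempty, hnil] at hlevel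
      simp only [hnil]
      rw [hlevel]
      by_cases hi : PySem.Set.inter ns m = []
      · rw [if_pos hi, if_pos hi]
        have hns : ∀ x ∈ ns, x ∉ seen := fun x hx => (hp x hx).1
        have hu : PySem.Set.union seen ns = seen ++ ns := pvUnionAppend seen ns nd hns
        rw [hu]
        refine ih ns (seen ++ ns) (d + 1) ?_
        have hcount : ((pvAllNbrs graph).filter (fun x =>
              decide (¬ x ∈ seen ++ ns))).length + ns.length ≤
            ((pvAllNbrs graph).filter (fun x => decide (¬ x ∈ seen))).length := by
          refine pvCount _ ns _ _ (PySem.Set.nodup_ofList _) nd (fun x hx => ?_) (fun x => ?_)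
          · obtain ⟨n, _, hxn⟩ := (hp x hx).2.2
            exact ⟨pvGetD_subset graph n x hxn, by simp [(hp x hx).1]⟩
          · simp [List.mem_append]
        have hpos : 1 ≤ layer.length := List.length_pos_iff.mpr hl
        omega
      · rw [if_neg hi, if_neg hi]

-- ===== VERDICT (by name: the statement is the Claim_ definition above) =====
theorem find_closest_marked_node_spec : Claim_equal_find_closest_marked_node := by
  intro graph start_node marked_nodes _
  unfold Spec_find_closest_marked_node find_closest_marked_node find_closest_marked_node_alt
  split_ifs with h1 h2
  · rfl
  case pos =>
    show (if PySem.Set.contains (PySem.Set.ofList marked_nodes) start_node = true then (0 : Int)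
        else pvLoopA graph (PySem.Set.ofList marked_nodes) [(start_node, 0)]
          (PySem.Set.ofList [start_node])) =
      (if PySem.Set.contains (PySem.Set.ofList marked_nodes) start_node = true then (0 : Int)
        else pvLoopB graph (PySem.Set.ofList marked_nodes) (PySem.Set.ofList [start_node])
          (PySem.Set.ofList [start_node]) 0)
    by_cases hms : PySem.Set.contains (PySem.Set.ofList marked_nodes) start_node = true
    · rw [if_pos hms, if_pos hms]
    · rw [if_neg hms, if_neg hms]
      have hm := pvMain graph (PySem.Set.ofList marked_nodes)
          (((pvAllNbrs graph).filter (fun x => decide (¬ x ∈ ([start_node] : List Int)))).length + 1)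
          [start_node] [start_node] 0 (by simp)
      have h0 : PySem.Set.ofList [start_node] = [start_node] := rfl
      rw [h0]
      simpa using hm
  case neg => rfl
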